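-- pv_equiv track=rewrite | github.com/matejklemen/slonspell | prepare_dataset_functions/make_text_incorrect_functions.py | make_T5_row
-- ===== SOURCE A (Python) =====
-- def make_T5_row(line, mask_token="<mask>"):
--     new_line = []
--
--     for word in line.split(' '):
--         if mask_token in word:
--             new_line.append(mask_token)
--         else:
--             new_line.append(word)
--
--     return " ".join(new_line)
-- ===== SOURCE B (Python) =====
-- def make_T5_row(line, mask_token="<mask>"):
--     out = []
--     cur = []
--     for ch in line:
--         if ch == ' ':
--             w = ''.join(cur)
--             out.append(mask_token if mask_token in w else w)
--             out.append(' ')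
--             cur = []
--         else:
--             cur.append(ch)
--     w = ''.join(cur)
--     out.append(mask_token if mask_token in w else w)
--     return ''.join(out)
-- ===== Notes on version B (the rewrite author's own statement) =====
-- stated objective: alternative
-- what changed: Replaces the split/loop/join pipeline with a single character-level pass that builds the output directly, flushing each space-delimited run through the mask check as it is reached.
import Mathlib
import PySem

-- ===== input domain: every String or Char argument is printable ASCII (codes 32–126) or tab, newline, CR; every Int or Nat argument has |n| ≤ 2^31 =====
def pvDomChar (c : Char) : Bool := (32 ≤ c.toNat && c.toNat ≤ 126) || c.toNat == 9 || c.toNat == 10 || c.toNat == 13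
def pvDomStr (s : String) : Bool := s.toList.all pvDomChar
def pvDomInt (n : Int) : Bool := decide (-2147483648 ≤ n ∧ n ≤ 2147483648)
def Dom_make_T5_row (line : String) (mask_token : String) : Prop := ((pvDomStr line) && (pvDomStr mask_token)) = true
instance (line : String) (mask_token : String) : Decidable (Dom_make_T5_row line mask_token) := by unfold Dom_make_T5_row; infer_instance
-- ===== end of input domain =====

-- B replaces split/loop/join by one direct character scan; alternative decomposition, same cost.

-- ===== PORT A =====
def make_T5_row (line : String) (mask_token : String) : String :=
  let new_line := ((PySem.Str.split? line " ").getD []).foldl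
    (fun acc w => acc ++ [if PySem.Str.isIn mask_token w then mask_token else w]) []
  PySem.Str.join " " new_line

-- ===== PORT B =====
-- flush of the current word: mask_token if it occurs in the word, else the word
def pvMaskWord (mask cur : List Char) : List Char :=
  if PySem.Chars.isIn mask cur then mask else cur

-- the single pass of Source B: walk the characters, flushing at each space and at the end
def pvScan (mask : List Char) (cur : List Char) : List Char → List Char
  | [] => pvMaskWord mask cur
  | c :: rest =>
      if c = ' ' then pvMaskWord mask cur ++ ' ' :: pvScan mask [] rest
      else pvScan mask (cur ++ [c]) rest

def make_T5_row_alt (line : String) (mask_token : String) : String :=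
  String.ofList (pvScan mask_token.toList [] line.toList)

-- ===== PRECONDITION & SPEC =====
def Spec_make_T5_row (line : String) (mask_token : String) (out : String) : Prop := out = make_T5_row_alt line mask_token
instance (line : String) (mask_token : String) (out : String) : Decidable (Spec_make_T5_row line mask_token out) := by unfold Spec_make_T5_row; infer_instance

-- ===== CLAIM (what is proved, stated in full; the proofs are below) =====
def Claim_equal_make_T5_row : Prop := ∀ (line : String) (mask_token : String), Dom_make_T5_row line mask_token → Spec_make_T5_row line mask_token (make_T5_row line mask_token)

-- ===== LEMMAS AND PROOFS =====

-- reference splitter: splitAux cs cur = the pieces of cs split on ' ', with cur the reversed current piece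
def splitAux : List Char → List Char → List (List Char)
  | [], cur => [cur.reverse]
  | c :: rest, cur => if c = ' ' then cur.reverse :: splitAux rest [] else splitAux rest (c :: cur)

theorem splitAux_ne_nil (cs cur : List Char) : splitAux cs cur ≠ [] := by
  induction cs generalizing cur with
  | nil => simp [splitAux]
  | cons c rest ih => simp only [splitAux]; split_ifs <;> simp [ih]

theorem go_eq (l : List Char) : ∀ (fuel : Nat) (cur : List Char) (acc : List (List Char)),
    l.length < fuel →
    PySem.Chars.splitOn.go [' '] fuel l cur acc = acc.reverse ++ splitAux l cur := by
  induction l with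
  | nil =>
      intro fuel cur acc h
      match fuel with
      | f + 1 => simp [PySem.Chars.splitOn.go, splitAux]
  | cons c rest ih =>
      intro fuel cur acc h
      match fuel with
      | f + 1 =>
        rw [PySem.Chars.splitOn.go]
        by_cases hc : c = ' '
        · subst hc
          rw [if_pos (by simp)]
          show PySem.Chars.splitOn.go [' '] f rest [] (cur.reverse :: acc) = _
          rw [ih f [] (cur.reverse :: acc) (by simp at h; omega)]
          simp [splitAux]
        · rw [if_neg (by simp [Ne.symm hc])]
          rw [ih f (c :: cur) acc (by simp at h; omega)]
          simp [splitAux, hc]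

theorem splitOn_char_eq (cs : List Char) :
    PySem.Chars.splitOn cs [' '] = splitAux cs [] := by
  unfold PySem.Chars.splitOn
  exact go_eq cs (cs.length + 1) [] [] (by omega)

theorem foldl_append_map (g : String → String) (ws : List String) (acc : List String) :
    ws.foldl (fun acc w => acc ++ [g w]) acc = acc ++ ws.map g := by
  induction ws generalizing acc with
  | nil => simp
  | cons w ws ih => simp [ih]

theorem join_cons (sep a : List Char) (l : List (List Char)) (h : l ≠ []) :
    PySem.Chars.join sep (a :: l) = a ++ sep ++ PySem.Chars.join sep l := by
  obtain ⟨b, l', rfl⟩ := List.exists_cons_of_ne_nil h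
  simp [PySem.Chars.join, List.intercalate]

theorem scan_eq (mask : List Char) (cs : List Char) : ∀ cur : List Char,
    pvScan mask cur cs = PySem.Chars.join [' '] ((splitAux cs cur.reverse).map (pvMaskWord mask)) := by
  induction cs with
  | nil => intro cur; simp [pvScan, splitAux, PySem.Chars.join, List.intercalate]
  | cons c rest ih =>
      intro cur
      by_cases hc : c = ' '
      · subst hc
        simp only [pvScan, splitAux, if_true, List.map_cons, List.reverse_reverse]
        rw [join_cons _ _ _ (by simp [splitAux_ne_nil])]
        rw [ih []]
        simp
      · simp only [pvScan, splitAux, if_neg hc]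
        rw [ih (cur ++ [c])]
        simp

-- ===== VERDICT (by name: the statement is the Claim_ definition above) =====
theorem make_T5_row_spec : Claim_equal_make_T5_row := by
  intro line mask_token _
  unfold Spec_make_T5_row make_T5_row make_T5_row_alt
  rw [scan_eq]
  simp only [PySem.Str.split?, PySem.Chars.split?]
  rw [if_neg (by simp)]
  simp only [Option.map_some, Option.getD_some]
  rw [foldl_append_map (fun w => if PySem.Str.isIn mask_token w then mask_token else w)]
  simp only [List.nil_append, List.map_map]
  show PySem.Str.join " " _ = _
  unfold PySem.Str.join
  congr 1
  rw [show (" ".toList) = [' '] from rfl, splitOn_char_eq]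
  congr 1
  simp only [List.reverse_nil, List.map_map]
  refine List.map_congr_left ?_
  intro p _
  simp only [Function.comp, PySem.Str.isIn, String.toList_ofList, pvMaskWord]
  split_ifs <;> simp
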